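-- pv_equiv track=rewrite | github.com/berki6/main_test | helloworld.py | product_of_even_and_odd
-- ===== SOURCE A (Python) =====
-- def product_of_even_and_odd(n):
--     sum_of_even = 0
--     sum_of_odd = 0
--     for i in range(n):
--         if i % 2 == 0:
--             sum_of_even += i
--         else:
--             sum_of_odd += i
--     product = sum_of_even * sum_of_odd
--     return f"Product is: {product}"
-- ===== SOURCE B (Python) =====
-- def product_of_even_and_odd(n):
--     m = max(n, 0)
--     e = (m + 1) // 2  # how many even numbers in range(m)
--     o = m // 2        # how many odd numbers in range(m)
--     # sum of evens = e*(e-1), sum of odds = o*o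
--     return f"Product is: {e * (e - 1) * o * o}"
-- ===== Notes on version B (the rewrite author's own statement) =====
-- stated objective: faster
-- what changed: Replaced the O(n) loop over range(n) with closed-form arithmetic-series counts: sum of evens below n is e*(e-1) with e=(n+1)//2 and sum of odds is o*o with o=n//2.
import Mathlib
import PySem

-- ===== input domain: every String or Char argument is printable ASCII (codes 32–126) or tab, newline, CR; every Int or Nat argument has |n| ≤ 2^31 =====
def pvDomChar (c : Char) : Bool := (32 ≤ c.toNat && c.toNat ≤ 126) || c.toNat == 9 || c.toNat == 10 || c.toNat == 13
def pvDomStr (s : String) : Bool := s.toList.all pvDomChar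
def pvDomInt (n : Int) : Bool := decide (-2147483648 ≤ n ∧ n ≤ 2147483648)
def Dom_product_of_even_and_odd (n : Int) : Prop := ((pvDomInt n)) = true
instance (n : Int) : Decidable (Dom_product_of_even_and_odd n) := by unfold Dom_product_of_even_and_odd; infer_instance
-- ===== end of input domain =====

-- B replaces A's O(n) loop with closed-form arithmetic-series formulas (objective: faster, asymptotic).

-- ===== PORT A =====
def product_of_even_and_odd (n : Int) : String :=
  let s := (PySem.List.pyRange 0 n 1).foldl
    (fun (s : Int × Int) i =>
      if PySem.Int.mod i 2 == 0 then (s.1 + i, s.2) else (s.1, s.2 + i))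
    (0, 0)
  let product := s.1 * s.2
  "Product is: " ++ PySem.Int.toStr product

-- ===== PORT B =====
def product_of_even_and_odd_alt (n : Int) : String :=
  let m := max n 0
  let e := PySem.Int.floordiv (m + 1) 2
  let o := PySem.Int.floordiv m 2
  "Product is: " ++ PySem.Int.toStr (e * (e - 1) * o * o)

-- ===== PRECONDITION & SPEC =====
def Spec_product_of_even_and_odd (n : Int) (out : String) : Prop := out = product_of_even_and_odd_alt n
instance (n : Int) (out : String) : Decidable (Spec_product_of_even_and_odd n out) := by unfold Spec_product_of_even_and_odd; infer_instance

-- ===== CLAIM (what is proved, stated in full; the proofs are below) =====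
def Claim_equal_product_of_even_and_odd : Prop := ∀ (n : Int), Dom_product_of_even_and_odd n → Spec_product_of_even_and_odd n (product_of_even_and_odd n)

-- ===== LEMMAS AND PROOFS =====

-- The loop state after processing range(k): (sum of evens, sum of odds) in closed form.
theorem pv_fold_formula (k : Nat) :
    (PySem.List.pyRange 0 (k : Int) 1).foldl
      (fun (s : Int × Int) i =>
        if PySem.Int.mod i 2 == 0 then (s.1 + i, s.2) else (s.1, s.2 + i))
      (0, 0)
    = ((((k + 1) / 2 : Nat) : Int) * ((((k + 1) / 2 : Nat) : Int) - 1),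
       (((k / 2 : Nat) : Int)) * (((k / 2 : Nat) : Int))) := by
  induction k with
  | zero =>
      simp [PySem.List.pyRange_one_eq_nil]
  | succ k ih =>
      have hsplit : PySem.List.pyRange 0 ((k + 1 : Nat) : Int) 1
          = PySem.List.pyRange 0 (k : Int) 1 ++ [(k : Int)] := by
        have := PySem.List.pyRange_one_succ_right (a := 0) (b := (k : Int)) (by exact_mod_cast Nat.zero_le k)
        push_cast
        exact this
      rw [hsplit, List.foldl_append, ih]
      simp only [List.foldl_cons, List.foldl_nil]
      have hmod : PySem.Int.mod (k : Int) 2 = ((k % 2 : Nat) : Int) := by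
        exact_mod_cast PySem.Int.mod_natCast k 2
      rcases Nat.even_or_odd k with ⟨j, hj⟩ | ⟨j, hj⟩
      · -- k = j + j : even, added to the even sum
        subst hj
        have h2 : (j + j) % 2 = 0 := by omega
        have e1 : (j + j + 1) / 2 = j := by omega
        have e2 : (j + j + 1 + 1) / 2 = j + 1 := by omega
        have o1 : (j + j) / 2 = j := by omega
        rw [hmod]
        simp only [h2, e1, e2, o1]
        norm_num [Prod.ext_iff]
        ring
      · -- k = 2*j + 1 : odd, added to the odd sum
        subst hj
        have h2 : (2 * j + 1) % 2 = 1 := by omega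
        have e1 : (2 * j + 1 + 1) / 2 = j + 1 := by omega
        have e2 : (2 * j + 1 + 1 + 1) / 2 = j + 1 := by omega
        have o1 : (2 * j + 1) / 2 = j := by omega
        rw [hmod]
        simp only [h2, e1, e2, o1]
        norm_num [Prod.ext_iff]
        ring

-- ===== VERDICT (by name: the statement is the Claim_ definition above) =====
theorem product_of_even_and_odd_spec : Claim_equal_product_of_even_and_odd := by
  intro n _
  unfold Spec_product_of_even_and_odd product_of_even_and_odd product_of_even_and_odd_alt
  rcases (by omega : n ≤ 0 ∨ 0 < n) with hn | hn
  · -- empty range; B: m = 0, e = 0, o = 0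
    have hmax : max n 0 = 0 := by omega
    rw [PySem.List.pyRange_one_eq_nil hn, hmax]
    norm_num [PySem.Int.floordiv]
  · -- n = (k : Nat), k > 0
    obtain ⟨k, rfl⟩ : ∃ k : Nat, n = (k : Nat) := ⟨n.toNat, by omega⟩
    have hmax : max (k : Int) 0 = (k : Int) := by omega
    rw [pv_fold_formula, hmax]
    have he : PySem.Int.floordiv ((k : Int) + 1) 2 = (((k + 1) / 2 : Nat) : Int) := by
      have := PySem.Int.floordiv_natCast (k + 1) 2
      push_cast at this ⊢
      exact this
    have ho : PySem.Int.floordiv (k : Int) 2 = (((k / 2 : Nat) : Int)) := by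
      exact_mod_cast PySem.Int.floordiv_natCast k 2
    simp only [he, ho]
    push_cast
    ring_nf
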